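-- pv_equiv track=rewrite | github.com/sayedgamal99/Problem-Solving | Python/LeetCode/Graph/1579RemoveMaxNumberEdgesKeepGraphFullyTraversable.py | maxNumEdgesToRemove
-- ===== SOURCE A (Python) =====
-- class UF:
--     def __init__(self, n):
--         self.n = n
--         self.par = [i for i in range(n+1)]
--         self.rank = [1]*(n+1)
--
--     def find(self, x):
--         while x != self.par[x]:
--             self.par[x] = self.par[self.par[x]]
--             x = self.par[x]
--         return x
--
--     def union(self, x1, x2):
--         p1, p2 = self.find(x1), self.find(x2)
--         if p1 == p2:
--             return 0
--         if self.rank[p1] > self.rank[p2]: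
--             self.rank[p1] += self.rank[p2]
--             self.par[p2] = p1
--         else:
--             self.rank[p2] += self.rank[p1]
--             self.par[p1] = p2
--         self.n -= 1
--         return 1
--
--     def isConnected(self):
--         return self.n == 1
--
-- def maxNumEdgesToRemove(n: int, edges: list[list[int]]) -> int:
--     alice, bob = UF(n), UF(n)
--     cnt = 0
--     for t, u, v in edges:
--         if t == 3:
--             cnt += (alice.union(u, v) | bob.union(u, v))
--
--     for t, u, v in edges:
--
--         if t == 1:
--             cnt += alice.union(u, v)
--         elif t == 2:
--             cnt += bob.union(u, v)
--
--     if bob.isConnected() and alice.isConnected():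
--         return len(edges)-cnt
--     return -1
-- ===== SOURCE B (Python) =====
-- def _components(n, pairs):
--     # quick-find labelling over the padded vertex list 0..n that UF(n) carries
--     # (index 0 is a sentinel vertex that never counts as a real node);
--     # returns the number of distinct labels, i.e. the number of components
--     label = list(range(n + 1))
--     for u, v in pairs:
--         a, b = label[u], label[v]
--         if a != b:
--             label = [b if x == a else x for x in label]
--     return len(set(label))
--
--
-- def maxNumEdgesToRemove(n: int, edges: list[list[int]]) -> int:
--     t3 = [(u, v) for t, u, v in edges if t == 3]
--     t1 = [(u, v) for t, u, v in edges if t == 1]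
--     t2 = [(u, v) for t, u, v in edges if t == 2]
--     c3 = _components(n, t3)
--     ca = _components(n, t3 + t1)
--     cb = _components(n, t3 + t2)
--     # fully traversable for a player iff exactly 2 components remain:
--     # the sentinel 0 and one component holding every real node
--     if ca == 2 and cb == 2:
--         return len(edges) - (((n + 1) - c3) + (c3 - ca) + (c3 - cb))
--     return -1
-- ===== Notes on version B (the rewrite author's own statement) =====
-- stated objective: alternative
-- what changed: Replaces A's interleaved rank/path-compression union-find with a running merge counter by three independent component counts of the padded vertex list 0..n (type-3 graph, then +type-1 and +type-2) computed with a quick-find relabelling array, combined by the closed-form len(edges) - ((n+1-c3)+(c3-ca)+(c3-cb)) with traversability iff exactly 2 components (sentinel 0 plus one real component).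
import Mathlib
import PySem

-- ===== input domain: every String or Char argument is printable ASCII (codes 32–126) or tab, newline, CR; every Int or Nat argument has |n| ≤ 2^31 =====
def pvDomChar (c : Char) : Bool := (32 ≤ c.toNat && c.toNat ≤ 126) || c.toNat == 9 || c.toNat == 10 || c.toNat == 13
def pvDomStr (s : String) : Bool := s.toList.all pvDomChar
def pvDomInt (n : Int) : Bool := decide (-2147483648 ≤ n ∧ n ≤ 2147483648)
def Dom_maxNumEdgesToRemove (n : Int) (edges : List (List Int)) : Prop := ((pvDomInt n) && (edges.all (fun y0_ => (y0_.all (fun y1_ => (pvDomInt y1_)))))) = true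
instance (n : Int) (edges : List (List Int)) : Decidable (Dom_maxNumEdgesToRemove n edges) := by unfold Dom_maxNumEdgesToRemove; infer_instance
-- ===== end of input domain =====

-- B replaces A's interleaved rank/path-compression union-find and running counter by three
-- quick-find component counts over the padded vertex list 0..n (type-3 graph, +type-1, +type-2)
-- combined by closed-form arithmetic; objective: alternative (structurally different, similar cost).
-- All list reads/writes use the total pyGetD/pySetD forms: on every input admitted by
-- Pre_maxNumEdgesToRemove the indices are in Python's (possibly negative, wrapping) range,
-- so they agree with Python exactly.

-- ===== PORT A =====
-- UF state: (par, rank, n); 'find' is the while-loop with path halving, fuel par.length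
-- (under Pre_ the parent chains are shorter than par.length, see lemma distP_lt_length below).
def ufFind : Nat → List Int → Int → List Int × Int
  | 0, par, x => (par, x)
  | f + 1, par, x =>
    if x ≠ PySem.List.pyGetD par x 0 then
      -- self.par[x] = self.par[self.par[x]]; x = self.par[x]
      let par1 := PySem.List.pySetD par x (PySem.List.pyGetD par (PySem.List.pyGetD par x 0) 0)
      ufFind f par1 (PySem.List.pyGetD par1 x 0)
    else (par, x)

def ufUnion (uf : List Int × List Int × Int) (x1 x2 : Int) :
    (List Int × List Int × Int) × Int :=
  let (par, rank, nn) := uf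
  -- fuel for the while-loop: under Pre_ the parent chains are shorter than par.length,
  -- and a negative (wrapping) start index costs at most one extra iteration
  let (par1, p1) := ufFind (par.length + 1) par x1
  let (par2, p2) := ufFind (par1.length + 1) par1 x2
  if p1 = p2 then ((par2, rank, nn), 0)
  else if PySem.List.pyGetD rank p1 0 > PySem.List.pyGetD rank p2 0 then
    ((PySem.List.pySetD par2 p2 p1,
      PySem.List.pySetD rank p1 (PySem.List.pyGetD rank p1 0 + PySem.List.pyGetD rank p2 0),
      nn - 1), 1)
  else
    ((PySem.List.pySetD par2 p1 p2,
      PySem.List.pySetD rank p2 (PySem.List.pyGetD rank p2 0 + PySem.List.pyGetD rank p1 0),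
      nn - 1), 1)

def ufInit (n : Int) : List Int × List Int × Int :=
  (PySem.List.pyRange 0 (n + 1) 1, List.replicate (n + 1).toNat 1, n)

-- first loop: type-3 edges go to both alice and bob; cnt += (alice.union | bob.union)
def phase1 (edges : List (List Int))
    (st : (List Int × List Int × Int) × (List Int × List Int × Int) × Int) :
    (List Int × List Int × Int) × (List Int × List Int × Int) × Int :=
  edges.foldl (fun st e =>
    match e with
    | [t, u, v] =>
      if t = 3 then
        let (alice, bob, cnt) := st
        let (alice', ra) := ufUnion alice u v
        let (bob', rb) := ufUnion bob u v
        (alice', bob', cnt + PySem.Int.bor ra rb)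
      else st
    | _ => st) st  -- non-3-element rows: Python raises ValueError; excluded by Pre_

-- second loop: type-1 edges to alice, type-2 to bob
def phase2 (edges : List (List Int))
    (st : (List Int × List Int × Int) × (List Int × List Int × Int) × Int) :
    (List Int × List Int × Int) × (List Int × List Int × Int) × Int :=
  edges.foldl (fun st e =>
    match e with
    | [t, u, v] =>
      let (alice, bob, cnt) := st
      if t = 1 then
        let (alice', r) := ufUnion alice u v
        (alice', bob, cnt + r)
      else if t = 2 then
        let (bob', r) := ufUnion bob u v
        (alice, bob', cnt + r)
      else st
    | _ => st) st

def maxNumEdgesToRemove (n : Int) (edges : List (List Int)) : Int :=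
  let st1 := phase1 edges (ufInit n, ufInit n, 0)
  let st2 := phase2 edges st1
  if st2.2.1.2.2 = 1 ∧ st2.1.2.2 = 1 then (edges.length : Int) - st2.2.2 else -1

-- ===== PORT B =====
-- one relabelling step of the quick-find labelling
def bStep (lab : List Int) (p : Int × Int) : List Int :=
  let a := PySem.List.pyGetD lab p.1 0
  let b := PySem.List.pyGetD lab p.2 0
  if a ≠ b then lab.map (fun x => if x = a then b else x) else lab

-- _components: fold the relabelling over the pairs, then count the distinct labels,
-- i.e. the components of the padded vertex list 0..n (index 0 is UF's sentinel vertex)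
def bComponents (n : Int) (ps : List (Int × Int)) : Int :=
  let lab := ps.foldl bStep (PySem.List.pyRange 0 (n + 1) 1)
  ((PySem.Set.ofList lab).length : Int)

-- [(u, v) for t, u, v in edges if t == t0]  (rows of another arity raise in Python; excluded by Pre_)
def pairsOf (t0 : Int) (edges : List (List Int)) : List (Int × Int) :=
  edges.filterMap (fun e =>
    match e with
    | [t, u, v] => if t = t0 then some (u, v) else none
    | _ => none)

def maxNumEdgesToRemove_alt (n : Int) (edges : List (List Int)) : Int :=
  let t3 := pairsOf 3 edges
  let t1 := pairsOf 1 edges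
  let t2 := pairsOf 2 edges
  let c3 := bComponents n t3
  let ca := bComponents n (t3 ++ t1)
  let cb := bComponents n (t3 ++ t2)
  -- fully traversable for a player iff exactly 2 components remain: the sentinel 0
  -- and one component holding every real node
  if ca = 2 ∧ cb = 2 then
    (edges.length : Int) - (((n + 1) - c3) + (c3 - ca) + (c3 - cb))
  else -1

-- ===== PRECONDITION & SPEC =====
-- Pre_ is exactly the domain on which the Python A returns normally: every row is a 3-element
-- list [t, u, v] (anything else raises ValueError when unpacking), and rows of type 1, 2 or 3
-- carry indices within Python's list range -(n+2) < u, v ≤ n (anything else raises IndexError;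
-- negative indices wrap and are accepted by both programs).  Rows of any other type are never
-- indexed, so their u, v are unconstrained.
def edgeOK (n : Int) (e : List Int) : Bool :=
  match e with
  | [t, u, v] => decide ((t = 1 ∨ t = 2 ∨ t = 3) →
      (-(n + 1) ≤ u ∧ u ≤ n ∧ -(n + 1) ≤ v ∧ v ≤ n))
  | _ => false

def Pre_maxNumEdgesToRemove (n : Int) (edges : List (List Int)) : Prop :=
  edges.all (edgeOK n) = true
instance (n : Int) (edges : List (List Int)) : Decidable (Pre_maxNumEdgesToRemove n edges) := by
  unfold Pre_maxNumEdgesToRemove; infer_instance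

def pvWitness_maxNumEdgesToRemove : Int × List (List Int) :=
  (4, [[3, 1, 2], [3, 2, 3], [1, 1, 3], [1, 2, 4], [1, 1, 2], [2, 3, 4]])

def Spec_maxNumEdgesToRemove (n : Int) (edges : List (List Int)) (out : Int) : Prop := out = maxNumEdgesToRemove_alt n edges
instance (n : Int) (edges : List (List Int)) (out : Int) : Decidable (Spec_maxNumEdgesToRemove n edges out) := by unfold Spec_maxNumEdgesToRemove; infer_instance

-- ===== CLAIM (what is proved, stated in full; the proofs are below) =====
def Claim_equal_maxNumEdgesToRemove : Prop := ∀ (n : Int) (edges : List (List Int)), Dom_maxNumEdgesToRemove n edges → Pre_maxNumEdgesToRemove n edges → Spec_maxNumEdgesToRemove n edges (maxNumEdgesToRemove n edges)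


-- ===== LEMMAS AND PROOFS =====

-- ---- abstract parent-forest theory (Nat side) ----
def stepP (p : List Int) (i : Nat) : Nat := (p.getD i 0).toNat

def iterP (p : List Int) : Nat → Nat → Nat
  | 0, i => i
  | k + 1, i => iterP p k (stepP p i)

abbrev isRootP (p : List Int) (i : Nat) : Prop := stepP p i = i

def hasRootP (p : List Int) (i : Nat) : Prop := ∃ k, isRootP p (iterP p k i)

def GoodP (p : List Int) : Prop :=
  ∀ i, i < p.length → 0 ≤ p.getD i 0 ∧ stepP p i < p.length ∧ hasRootP p i

noncomputable def distC (p : List Int) (i : Nat) : Nat :=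
  @dite _ (hasRootP p i) (Classical.dec _) (fun h => Nat.find h) (fun _ => 0)

noncomputable def rootC (p : List Int) (i : Nat) : Nat := iterP p (distC p i) i

lemma iterP_succ_right (p : List Int) (k i : Nat) :
    iterP p (k + 1) i = stepP p (iterP p k i) := by
  induction k generalizing i with
  | zero => rfl
  | succ m ih => rw [iterP]; rw [ih]; rfl

lemma iterP_of_isRoot (p : List Int) {r : Nat} (h : isRootP p r) (k : Nat) :
    iterP p k r = r := by
  induction k with
  | zero => rfl
  | succ m ih => rw [iterP_succ_right, ih, h]

lemma distC_of_hasRoot (p : List Int) (i : Nat) (h : hasRootP p i) :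
    isRootP p (iterP p (distC p i) i) := by
  unfold distC; rw [dif_pos h]; exact Nat.find_spec h

lemma rootC_isRoot (p : List Int) (i : Nat) (h : hasRootP p i) :
    isRootP p (rootC p i) := distC_of_hasRoot p i h

lemma distC_le_of_isRoot (p : List Int) {i k : Nat} (h : isRootP p (iterP p k i)) :
    distC p i ≤ k := by
  unfold distC; rw [dif_pos ⟨k, h⟩]; exact Nat.find_min' _ h

lemma distC_of_isRoot (p : List Int) {i : Nat} (h : isRootP p i) : distC p i = 0 :=
  Nat.le_zero.mp (distC_le_of_isRoot p (k := 0) h)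

lemma rootC_of_isRoot (p : List Int) {i : Nat} (h : isRootP p i) : rootC p i = i := by
  unfold rootC; rw [distC_of_isRoot p h]; rfl

lemma hasRootP_step (p : List Int) {i : Nat} (h : hasRootP p i) (hne : ¬ isRootP p i) :
    hasRootP p (stepP p i) := by
  obtain ⟨k, hk⟩ := h
  cases k with
  | zero => exact absurd hk hne
  | succ m => exact ⟨m, by rwa [iterP] at hk⟩

lemma distC_step (p : List Int) {i : Nat} (h : hasRootP p i) (hne : ¬ isRootP p i) :
    distC p i = distC p (stepP p i) + 1 := by
  have h' : hasRootP p (stepP p i) := hasRootP_step p h hne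
  apply le_antisymm
  · have := distC_of_hasRoot p _ h'
    exact distC_le_of_isRoot p (k := distC p (stepP p i) + 1) (by rwa [iterP])
  · have hroot := distC_of_hasRoot p i h
    have hd : distC p i ≠ 0 := fun h0 => hne (by simpa [h0, iterP] using hroot)
    obtain ⟨m, hm⟩ := Nat.exists_eq_succ_of_ne_zero hd
    rw [hm] at hroot ⊢
    rw [iterP] at hroot
    exact Nat.succ_le_succ (distC_le_of_isRoot p hroot)

lemma rootC_step (p : List Int) {i : Nat} (h : hasRootP p i) (hne : ¬ isRootP p i) :
    rootC p i = rootC p (stepP p i) := by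
  unfold rootC
  rw [distC_step p h hne, iterP]

lemma rootC_eq_of_iter_root (p : List Int) :
    ∀ (k : Nat) (i r : Nat), hasRootP p i → iterP p k i = r → isRootP p r → rootC p i = r := by
  intro k
  induction k with
  | zero => intro i r _ hk hr; subst hk; exact rootC_of_isRoot p hr
  | succ m ih =>
    intro i r h hk hr
    by_cases hi : isRootP p i
    · rw [iterP_of_isRoot p hi] at hk; subst hk; exact rootC_of_isRoot p hi
    · rw [iterP] at hk
      rw [rootC_step p h hi]
      exact ih _ _ (hasRootP_step p h hi) hk hr

lemma rootC_iter (p : List Int) (k : Nat) {i : Nat} (h : hasRootP p i) :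
    rootC p (iterP p k i) = rootC p i := by
  induction k generalizing i with
  | zero => rfl
  | succ m ih =>
    by_cases hi : isRootP p i
    · rw [iterP_of_isRoot p hi]
    · rw [iterP, ih (hasRootP_step p h hi), rootC_step p h hi]

lemma distC_iter (p : List Int) (k : Nat) {i : Nat} (h : hasRootP p i) :
    distC p (iterP p k i) = distC p i - k := by
  induction k generalizing i with
  | zero => rfl
  | succ m ih =>
    by_cases hi : isRootP p i
    · rw [iterP_of_isRoot p hi, distC_of_isRoot p hi]
      omega
    · rw [iterP, ih (hasRootP_step p h hi), distC_step p h hi]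
      omega

lemma iterP_lt_length (p : List Int) (hg : GoodP p) {i : Nat} (hi : i < p.length) (k : Nat) :
    iterP p k i < p.length := by
  induction k generalizing i with
  | zero => exact hi
  | succ m ih => rw [iterP]; exact ih ((hg i hi).2.1)

lemma rootC_lt_length (p : List Int) (hg : GoodP p) {i : Nat} (hi : i < p.length) :
    rootC p i < p.length := iterP_lt_length p hg hi _

lemma distC_lt_length (p : List Int) (hg : GoodP p) {i : Nat} (hi : i < p.length) :
    distC p i < p.length := by
  have hroot : hasRootP p i := (hg i hi).2.2
  have hinj : Function.Injective
      (fun k : Fin (distC p i + 1) => (⟨iterP p k.1 i, iterP_lt_length p hg hi k.1⟩ : Fin p.length)) := by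
    intro a b hab
    have h1 : iterP p a.1 i = iterP p b.1 i := congrArg Fin.val hab
    have h2 : distC p i - a.1 = distC p i - b.1 := by
      rw [← distC_iter p a.1 hroot, ← distC_iter p b.1 hroot, h1]
    have ha := a.2
    have hb := b.2
    exact Fin.ext (by omega)
  have := Fintype.card_le_of_injective _ hinj
  simpa using this

-- redirecting a non-root to its grandparent preserves roots and does not lengthen paths
lemma getD_set_ne (p : List Int) (x y : Nat) (v : Int) (h : y ≠ x) :
    (p.set x v).getD y 0 = p.getD y 0 := by
  simp [List.getD, List.getElem?_set_ne (Ne.symm h)]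

lemma getD_set_self (p : List Int) (x : Nat) (v : Int) (h : x < p.length) :
    (p.set x v).getD x 0 = v := by
  simp [List.getD, h]

lemma stepP_set_ne (p : List Int) (x y : Nat) (v : Int) (h : y ≠ x) :
    stepP (p.set x v) y = stepP p y := by
  unfold stepP; rw [getD_set_ne p x y v h]

lemma stepP_set_self (p : List Int) (x g : Nat) (h : x < p.length) :
    stepP (p.set x ((g : Nat) : Int)) x = g := by
  unfold stepP; rw [getD_set_self p x _ h]; exact Int.toNat_natCast g

-- Python index normalisation: the Nat position a (possibly negative) in-range index denotes
def nIdx (L : Nat) (x : Int) : Nat := if 0 ≤ x then x.toNat else L - (-x).toNat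

lemma nIdx_lt (L : Nat) (x : Int) (_h1 : -(L : Int) ≤ x) (h2 : x < (L : Int)) (hL : 0 < L) :
    nIdx L x < L := by
  unfold nIdx; split_ifs <;> omega

lemma pyIdx?_wrap (L : Nat) (x : Int) (h1 : -(L : Int) ≤ x) (h2 : x < (L : Int)) :
    PySem.List.pyIdx? L x = some (nIdx L x) := by
  unfold PySem.List.pyIdx? nIdx
  split_ifs <;> simp_all

lemma pyGetD_wrap (p : List Int) (x : Int) (d : Int)
    (h1 : -(p.length : Int) ≤ x) (h2 : x < (p.length : Int)) :
    PySem.List.pyGetD p x d = p.getD (nIdx p.length x) d := by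
  have hlt : nIdx p.length x < p.length := nIdx_lt _ _ h1 h2 (by omega)
  rw [PySem.List.pyGetD, PySem.List.pyGet?, pyIdx?_wrap _ _ h1 h2]
  simp [List.getD, List.getElem?_eq_getElem hlt]

lemma pySetD_wrap (p : List Int) (x : Int) (v : Int)
    (h1 : -(p.length : Int) ≤ x) (h2 : x < (p.length : Int)) :
    PySem.List.pySetD p x v = p.set (nIdx p.length x) v := by
  rw [PySem.List.pySetD, PySem.List.pySet?, pyIdx?_wrap _ _ h1 h2]
  rfl

lemma distC_pos_of_not_root (p : List Int) {i : Nat} (h : hasRootP p i)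
    (hne : ¬ isRootP p i) : 1 ≤ distC p i := by
  rcases Nat.eq_zero_or_pos (distC p i) with h0 | h1
  · exact absurd (by simpa [h0, iterP] using distC_of_hasRoot p i h) hne
  · exact h1

lemma reparent (p : List Int) (x : Nat) (hg : GoodP p) (hx : x < p.length)
    (hnr : ¬ isRootP p x) :
    let p' := p.set x ((iterP p 2 x : Nat) : Int)
    GoodP p' ∧ (∀ y, y < p.length → rootC p' y = rootC p y ∧ distC p' y ≤ distC p y) := by
  intro p'
  have hlen : p'.length = p.length := by simp [p']
  have hrx : hasRootP p x := (hg x hx).2.2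
  have hglt : iterP p 2 x < p.length := iterP_lt_length p hg hx 2
  have hstep_self : stepP p' x = iterP p 2 x := stepP_set_self p x _ hx
  have main : ∀ d y, y < p.length → distC p y ≤ d → ∃ k ≤ distC p y, iterP p' k y = rootC p y := by
    intro d
    induction d with
    | zero =>
      intro y hy hd
      have hroot : isRootP p y := by
        have := distC_of_hasRoot p y (hg y hy).2.2
        simpa [Nat.le_zero.mp hd, iterP] using this
      exact ⟨0, Nat.zero_le _, (rootC_of_isRoot p hroot).symm⟩
    | succ d ih =>
      intro y hy hd
      by_cases hroot : isRootP p y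
      · exact ⟨0, Nat.zero_le _, (rootC_of_isRoot p hroot).symm⟩
      · have hry : hasRootP p y := (hg y hy).2.2
        have hd1 : 1 ≤ distC p y := distC_pos_of_not_root p hry hroot
        by_cases hyx : y = x
        · subst hyx
          have hdg : distC p (iterP p 2 y) = distC p y - 2 := distC_iter p 2 hry
          obtain ⟨k, hk, hiter⟩ := ih (iterP p 2 y) hglt (by omega)
          refine ⟨k + 1, by omega, ?_⟩
          rw [iterP, hstep_self, hiter, rootC_iter p 2 hry]
        · have hds : distC p (stepP p y) = distC p y - 1 := by
            rw [distC_step p hry hroot]; omega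
          obtain ⟨k, hk, hiter⟩ := ih (stepP p y) (hg y hy).2.1 (by omega)
          refine ⟨k + 1, by omega, ?_⟩
          rw [iterP, stepP_set_ne p x y _ hyx, hiter, ← rootC_step p hry hroot]
  have hrootroot : ∀ y, y < p.length → isRootP p' (rootC p y) := by
    intro y hy
    have hr := rootC_isRoot p y (hg y hy).2.2
    have hne : rootC p y ≠ x := fun h => hnr (h ▸ hr)
    rw [isRootP, stepP_set_ne p x _ _ hne]
    exact hr
  have hhas : ∀ y, y < p.length → ∃ k ≤ distC p y, iterP p' k y = rootC p y :=
    fun y hy => main (distC p y) y hy le_rfl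
  have hgood : GoodP p' := by
    intro i hi
    rw [hlen] at hi
    refine ⟨?_, ?_, ?_⟩
    · by_cases hix : i = x
      · subst hix; rw [show p'.getD i 0 = _ from getD_set_self p i _ hx]; positivity
      · rw [show p'.getD i 0 = _ from getD_set_ne p x i _ hix]; exact (hg i hi).1
    · rw [hlen]
      by_cases hix : i = x
      · subst hix; rw [hstep_self]; exact hglt
      · rw [stepP_set_ne p x i _ hix]; exact (hg i hi).2.1
    · obtain ⟨k, _, hiter⟩ := hhas i hi
      exact ⟨k, by rw [hiter]; exact hrootroot i hi⟩
  refine ⟨hgood, fun y hy => ?_⟩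
  obtain ⟨k, hk, hiter⟩ := hhas y hy
  constructor
  · exact rootC_eq_of_iter_root p' k y _ ⟨k, by rw [hiter]; exact hrootroot y hy⟩ hiter (hrootroot y hy)
  · exact le_trans (distC_le_of_isRoot p' (by rw [hiter]; exact hrootroot y hy)) hk

-- linking root r1 under root r2 merges the two classes
lemma link (p : List Int) (r1 r2 : Nat) (hg : GoodP p) (h1 : r1 < p.length)
    (h2 : r2 < p.length) (hr1 : isRootP p r1) (hr2 : isRootP p r2) (hne : r1 ≠ r2) :
    let p' := p.set r1 ((r2 : Nat) : Int)
    GoodP p' ∧ (∀ y, y < p.length →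
      rootC p' y = if rootC p y = r1 then r2 else rootC p y) := by
  intro p'
  have hlen : p'.length = p.length := by simp [p']
  have hstep_self : stepP p' r1 = r2 := stepP_set_self p r1 r2 h1
  have htgt_root : ∀ y, y < p.length →
      isRootP p' (if rootC p y = r1 then r2 else rootC p y) := by
    intro y hy
    by_cases hc : rootC p y = r1
    · rw [if_pos hc, isRootP, stepP_set_ne p r1 r2 _ (Ne.symm hne)]; exact hr2
    · rw [if_neg hc, isRootP, stepP_set_ne p r1 _ _ hc]
      exact rootC_isRoot p y (hg y hy).2.2
  have main : ∀ d y, y < p.length → distC p y ≤ d →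
      ∃ k, iterP p' k y = (if rootC p y = r1 then r2 else rootC p y) := by
    intro d
    induction d with
    | zero =>
      intro y hy hd
      have hroot : isRootP p y := by
        have := distC_of_hasRoot p y (hg y hy).2.2
        simpa [Nat.le_zero.mp hd, iterP] using this
      rw [rootC_of_isRoot p hroot]
      by_cases hc : y = r1
      · subst hc
        exact ⟨1, by rw [show iterP p' 1 y = stepP p' y from rfl, hstep_self, if_pos rfl]⟩
      · exact ⟨0, by rw [if_neg hc]; rfl⟩
    | succ d ih =>
      intro y hy hd
      by_cases hroot : isRootP p y
      · rw [rootC_of_isRoot p hroot]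
        by_cases hc : y = r1
        · subst hc
          exact ⟨1, by rw [show iterP p' 1 y = stepP p' y from rfl, hstep_self, if_pos rfl]⟩
        · exact ⟨0, by rw [if_neg hc]; rfl⟩
      · have hry : hasRootP p y := (hg y hy).2.2
        have hyr1 : y ≠ r1 := fun h => hroot (h ▸ hr1)
        have hds : distC p (stepP p y) = distC p y - 1 := by
          rw [distC_step p hry hroot]; omega
        have hd1 : 1 ≤ distC p y := distC_pos_of_not_root p hry hroot
        obtain ⟨k, hiter⟩ := ih (stepP p y) (hg y hy).2.1 (by omega)
        refine ⟨k + 1, ?_⟩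
        rw [iterP, stepP_set_ne p r1 y _ hyr1, hiter, ← rootC_step p hry hroot]
  have hhas : ∀ y, y < p.length →
      ∃ k, iterP p' k y = (if rootC p y = r1 then r2 else rootC p y) :=
    fun y hy => main (distC p y) y hy le_rfl
  have hgood : GoodP p' := by
    intro i hi
    rw [hlen] at hi
    refine ⟨?_, ?_, ?_⟩
    · by_cases hix : i = r1
      · subst hix; rw [show p'.getD i 0 = _ from getD_set_self p i _ h1]; positivity
      · rw [show p'.getD i 0 = _ from getD_set_ne p r1 i _ hix]; exact (hg i hi).1
    · rw [hlen]
      by_cases hix : i = r1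
      · subst hix; rw [hstep_self]; exact h2
      · rw [stepP_set_ne p r1 i _ hix]; exact (hg i hi).2.1
    · obtain ⟨k, hiter⟩ := hhas i hi
      exact ⟨k, by rw [hiter]; exact htgt_root i hi⟩
  refine ⟨hgood, fun y hy => ?_⟩
  obtain ⟨k, hiter⟩ := hhas y hy
  exact rootC_eq_of_iter_root p' k y _ ⟨k, by rw [hiter]; exact htgt_root y hy⟩ hiter (htgt_root y hy)

lemma ufFind_spec : ∀ (f : Nat) (p : List Int) (x : Int), GoodP p → 0 ≤ x →
    x.toNat < p.length → distC p x.toNat < f →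
    ∃ p', ufFind f p x = (p', ((rootC p x.toNat : Nat) : Int)) ∧ GoodP p' ∧
      p'.length = p.length ∧ (∀ y, y < p.length → rootC p' y = rootC p y) := by
  intro f
  induction f with
  | zero => intro p x _ _ _ h; omega
  | succ f ih =>
    intro p x hg hx0 hxL hdf
    have h0 : 0 ≤ p.getD x.toNat 0 := (hg _ hxL).1
    have hget : PySem.List.pyGetD p x 0 = ((stepP p x.toNat : Nat) : Int) := by
      rw [PySem.List.pyGetD_of_nonneg _ _ hx0]
      exact (Int.toNat_of_nonneg h0).symm
    by_cases hroot : isRootP p x.toNat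
    · refine ⟨p, ?_, hg, rfl, fun y _ => rfl⟩
      have hxx : ¬ x ≠ PySem.List.pyGetD p x 0 := by
        rw [hget, hroot, Int.toNat_of_nonneg hx0]; simp
      rw [ufFind, if_neg hxx, rootC_of_isRoot p hroot, Int.toNat_of_nonneg hx0]
    · have hne : x ≠ PySem.List.pyGetD p x 0 := by
        rw [hget]
        intro h
        exact hroot (by rw [isRootP]; omega)
      have hstepL : stepP p x.toNat < p.length := (hg _ hxL).2.1
      have hg0 : 0 ≤ p.getD (stepP p x.toNat) 0 := (hg _ hstepL).1
      have hinner : PySem.List.pyGetD p (PySem.List.pyGetD p x 0) 0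
          = ((iterP p 2 x.toNat : Nat) : Int) := by
        rw [hget, PySem.List.pyGetD_natCast]
        have : iterP p 2 x.toNat = stepP p (stepP p x.toNat) := rfl
        rw [this]
        exact (Int.toNat_of_nonneg hg0).symm
      have hpar1 : PySem.List.pySetD p x (PySem.List.pyGetD p (PySem.List.pyGetD p x 0) 0)
          = p.set x.toNat ((iterP p 2 x.toNat : Nat) : Int) := by
        rw [hinner, PySem.List.pySetD_of_nonneg _ _ hx0]
      obtain ⟨hgood1, hpres1⟩ := reparent p x.toNat hg hxL hroot
      set par1 := p.set x.toNat ((iterP p 2 x.toNat : Nat) : Int) with hpar1def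
      have hlen1 : par1.length = p.length := by simp [hpar1def]
      have hx2 : PySem.List.pyGetD par1 x 0 = ((iterP p 2 x.toNat : Nat) : Int) := by
        rw [PySem.List.pyGetD_of_nonneg _ _ hx0]
        exact getD_set_self p x.toNat _ hxL
      have hrx : hasRootP p x.toNat := (hg _ hxL).2.2
      have hglt : iterP p 2 x.toNat < par1.length := by
        rw [hlen1]; exact iterP_lt_length p hg hxL 2
      have hd1 : 1 ≤ distC p x.toNat := distC_pos_of_not_root p hrx hroot
      have hdg : distC par1 (iterP p 2 x.toNat) < f := by
        have h1 := (hpres1 (iterP p 2 x.toNat) (by rw [← hlen1]; exact hglt)).2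
        have h2 : distC p (iterP p 2 x.toNat) = distC p x.toNat - 2 := distC_iter p 2 hrx
        omega
      obtain ⟨p'', heq, hgood'', hlen'', hpres''⟩ :=
        ih par1 ((iterP p 2 x.toNat : Nat) : Int) hgood1 (by positivity)
          (by rw [Int.toNat_natCast]; exact hglt) (by rw [Int.toNat_natCast]; exact hdg)
      refine ⟨p'', ?_, hgood'', by rw [hlen'', hlen1], fun y hy => ?_⟩
      · rw [ufFind, if_pos hne]
        show ufFind f (PySem.List.pySetD p x _) (PySem.List.pyGetD (PySem.List.pySetD p x _) x 0) = _
        rw [hpar1, hx2, heq]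
        have : rootC par1 (iterP p 2 x.toNat) = rootC p x.toNat := by
          rw [(hpres1 (iterP p 2 x.toNat) (by rw [← hlen1]; exact hglt)).1, rootC_iter p 2 hrx]
        rw [Int.toNat_natCast, this]
      · rw [hpres'' y (by rw [hlen1]; exact hy)]
        exact (hpres1 y hy).1

-- ufFind on a possibly negative (Python-wrapping) start index
lemma ufFind_spec_wrap (f : Nat) (p : List Int) (x : Int) (hg : GoodP p)
    (hx1 : -(p.length : Int) ≤ x) (hx2 : x < (p.length : Int))
    (hdf : distC p (nIdx p.length x) + 2 ≤ f) :
    ∃ p', ufFind f p x = (p', ((rootC p (nIdx p.length x) : Nat) : Int)) ∧ GoodP p' ∧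
      p'.length = p.length ∧ (∀ y, y < p.length → rootC p' y = rootC p y) := by
  by_cases hx0 : 0 ≤ x
  · have : nIdx p.length x = x.toNat := by unfold nIdx; rw [if_pos hx0]
    rw [this] at hdf ⊢
    exact ufFind_spec f p x hg hx0 (by omega) (by omega)
  · have hL : 0 < p.length := by omega
    set w := nIdx p.length x with hwdef
    have hwlt : w < p.length := nIdx_lt _ _ hx1 hx2 hL
    obtain ⟨f', rfl⟩ : ∃ f', f = f' + 1 := ⟨f - 1, by omega⟩
    have h0 : 0 ≤ p.getD w 0 := (hg _ hwlt).1
    have hget : PySem.List.pyGetD p x 0 = ((stepP p w : Nat) : Int) := by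
      rw [pyGetD_wrap p x 0 hx1 hx2, ← hwdef]
      exact (Int.toNat_of_nonneg h0).symm
    have hne : x ≠ PySem.List.pyGetD p x 0 := by rw [hget]; omega
    have hstepL : stepP p w < p.length := (hg _ hwlt).2.1
    have hg0 : 0 ≤ p.getD (stepP p w) 0 := (hg _ hstepL).1
    have hinner : PySem.List.pyGetD p (PySem.List.pyGetD p x 0) 0
        = ((iterP p 2 w : Nat) : Int) := by
      rw [hget, PySem.List.pyGetD_natCast]
      have : iterP p 2 w = stepP p (stepP p w) := rfl
      rw [this]
      exact (Int.toNat_of_nonneg hg0).symm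
    have hpar1 : PySem.List.pySetD p x (PySem.List.pyGetD p (PySem.List.pyGetD p x 0) 0)
        = p.set w ((iterP p 2 w : Nat) : Int) := by
      rw [hinner, pySetD_wrap p x _ hx1 hx2, ← hwdef]
    have hx2' : PySem.List.pyGetD (p.set w ((iterP p 2 w : Nat) : Int)) x 0
        = ((iterP p 2 w : Nat) : Int) := by
      rw [pyGetD_wrap _ x 0 (by simpa using hx1) (by simpa using hx2)]
      have : nIdx (p.set w ((iterP p 2 w : Nat) : Int)).length x = w := by
        rw [List.length_set, ← hwdef]
      rw [this]
      exact getD_set_self p w _ hwlt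
    by_cases hroot : isRootP p w
    · -- the wrapped node is already a root: the first iteration writes par[w] back unchanged
      have hiter2 : iterP p 2 w = w := iterP_of_isRoot p hroot 2
      have hsetid : p.set w ((w : Nat) : Int) = p := by
        apply List.ext_getElem (by simp)
        intro i hi1 hi2
        by_cases hiw : i = w
        · subst hiw
          rw [List.getElem_set_self]
          have := hroot
          rw [isRootP, stepP] at this
          rw [List.getD_eq_getElem p 0 hi2] at h0 this
          omega
        · rw [List.getElem_set_ne (by omega)]
      obtain ⟨p', heq', hgood', hlen', hpres'⟩ :=
        ufFind_spec f' p ((w : Nat) : Int) hg (by positivity)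
          (by rw [Int.toNat_natCast]; exact hwlt)
          (by rw [Int.toNat_natCast, distC_of_isRoot p hroot]; omega)
      refine ⟨p', ?_, hgood', hlen', hpres'⟩
      rw [ufFind, if_pos hne]
      show ufFind f' (PySem.List.pySetD p x _) (PySem.List.pyGetD (PySem.List.pySetD p x _) x 0) = _
      rw [hpar1, hx2', hiter2, hsetid, heq', Int.toNat_natCast]
    · obtain ⟨hgood1, hpres1⟩ := reparent p w hg hwlt hroot
      set par1 := p.set w ((iterP p 2 w : Nat) : Int) with hpar1def
      have hlen1 : par1.length = p.length := by simp [hpar1def]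
      have hrx : hasRootP p w := (hg _ hwlt).2.2
      have hglt : iterP p 2 w < par1.length := by
        rw [hlen1]; exact iterP_lt_length p hg hwlt 2
      have hd1 : 1 ≤ distC p w := distC_pos_of_not_root p hrx hroot
      have hdg : distC par1 (iterP p 2 w) < f' := by
        have h1 := (hpres1 (iterP p 2 w) (by rw [← hlen1]; exact hglt)).2
        have h2 : distC p (iterP p 2 w) = distC p w - 2 := distC_iter p 2 hrx
        omega
      obtain ⟨p'', heq, hgood'', hlen'', hpres''⟩ :=
        ufFind_spec f' par1 ((iterP p 2 w : Nat) : Int) hgood1 (by positivity)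
          (by rw [Int.toNat_natCast]; exact hglt) (by rw [Int.toNat_natCast]; exact hdg)
      refine ⟨p'', ?_, hgood'', by rw [hlen'', hlen1], fun y hy => ?_⟩
      · rw [ufFind, if_pos hne]
        show ufFind f' (PySem.List.pySetD p x _) (PySem.List.pyGetD (PySem.List.pySetD p x _) x 0) = _
        rw [hpar1, hx2', heq]
        have : rootC par1 (iterP p 2 w) = rootC p w := by
          rw [(hpres1 (iterP p 2 w) (by rw [← hlen1]; exact hglt)).1, rootC_iter p 2 hrx]
        rw [Int.toNat_natCast, this]
      · rw [hpres'' y (by rw [hlen1]; exact hy)]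
        exact (hpres1 y hy).1

-- ---- simulation relation between A's union-find state and B's quick-find labelling ----
def SimRel (L : Nat) (uf : List Int × List Int × Int) (lab : List Int) : Prop :=
  uf.1.length = L ∧ lab.length = L ∧ GoodP uf.1 ∧
  (∀ i j, i < L → j < L →
    (rootC uf.1 i = rootC uf.1 j ↔ lab.getD i 0 = lab.getD j 0)) ∧
  uf.2.2 = ((lab.toFinset.card : Nat) : Int) - 1

lemma getD_map_lt (l : List Int) (f : Int → Int) (i : Nat) (h : i < l.length) :
    (l.map f).getD i 0 = f (l.getD i 0) := by
  simp [List.getD, List.getElem?_map, List.getElem?_eq_getElem h]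

lemma ite_swap_eq_iff {α : Type} [DecidableEq α] (x y c d : α) :
    ((if x = c then d else x) = (if y = c then d else y)) ↔
      (x = y ∨ ((x = c ∨ x = d) ∧ (y = c ∨ y = d))) := by
  by_cases hx : x = c <;> by_cases hy : y = c <;> subst_eqs <;> simp_all
  tauto

lemma image_swap (s : Finset Int) (a b : Int) (ha : a ∈ s) :
    s.image (fun x => if x = a then b else x) = insert b (s.erase a) := by
  ext z
  simp only [Finset.mem_image, Finset.mem_insert, Finset.mem_erase]
  constructor
  · rintro ⟨w, hw, hfw⟩
    by_cases hwa : w = a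
    · subst hwa; simp only [] at hfw; exact Or.inl hfw.symm
    · simp only [if_neg hwa] at hfw; subst hfw; exact Or.inr ⟨hwa, hw⟩
  · rintro (rfl | ⟨hza, hz⟩)
    · exact ⟨a, ha, by simp⟩
    · exact ⟨z, hz, by simp [hza]⟩

lemma getD_mem_toFinset (lab : List Int) (w : Nat) (hw : w < lab.length) :
    lab.getD w 0 ∈ lab.toFinset := by
  rw [List.mem_toFinset, List.getD_eq_getElem lab 0 hw]
  exact List.getElem_mem hw

lemma card_relabel (lab : List Int) (u v : Nat) (huL : u < lab.length) (hvL : v < lab.length)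
    (hab : lab.getD u 0 ≠ lab.getD v 0) :
    (lab.map (fun x => if x = lab.getD u 0 then lab.getD v 0 else x)).toFinset.card + 1
      = lab.toFinset.card := by
  set a := lab.getD u 0 with hadef
  set b := lab.getD v 0 with hbdef
  have ha : a ∈ lab.toFinset := getD_mem_toFinset lab u huL
  have hb : b ∈ lab.toFinset := getD_mem_toFinset lab v hvL
  have htf : (lab.map (fun x => if x = a then b else x)).toFinset
      = lab.toFinset.image (fun x => if x = a then b else x) := by
    ext z
    simp [List.mem_toFinset, Finset.mem_image, List.mem_map]
  rw [htf, image_swap _ a b ha,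
    Finset.insert_eq_self.mpr (Finset.mem_erase.mpr ⟨Ne.symm hab, hb⟩)]
  exact Finset.card_erase_add_one ha

lemma merged_inv (L : Nat) (par2 par3 lab : List Int) (u v : Nat)
    (hlabL : lab.length = L)
    (hinv : ∀ i j, i < L → j < L →
      (rootC par2 i = rootC par2 j ↔ lab.getD i 0 = lab.getD j 0))
    (huL : u < L) (hvL : v < L)
    (c d : Nat)
    (hcd : (c = rootC par2 u ∧ d = rootC par2 v) ∨ (c = rootC par2 v ∧ d = rootC par2 u))
    (hroot3 : ∀ y, y < L → rootC par3 y = if rootC par2 y = c then d else rootC par2 y) :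
    ∀ i j, i < L → j < L →
      (rootC par3 i = rootC par3 j ↔
        (lab.map (fun x => if x = lab.getD u 0 then lab.getD v 0 else x)).getD i 0
          = (lab.map (fun x => if x = lab.getD u 0 then lab.getD v 0 else x)).getD j 0) := by
  intro i j hiL hjL
  rw [hroot3 i hiL, hroot3 j hjL,
    getD_map_lt _ _ i (by rw [hlabL]; exact hiL), getD_map_lt _ _ j (by rw [hlabL]; exact hjL),
    ite_swap_eq_iff, ite_swap_eq_iff]
  have bu : ∀ w, w < L → (rootC par2 w = rootC par2 u ↔ lab.getD w 0 = lab.getD u 0) :=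
    fun w hwL => hinv w u hwL huL
  have bv : ∀ w, w < L → (rootC par2 w = rootC par2 v ↔ lab.getD w 0 = lab.getD v 0) :=
    fun w hwL => hinv w v hwL hvL
  rcases hcd with ⟨rfl, rfl⟩ | ⟨rfl, rfl⟩ <;>
      rw [hinv i j hiL hjL, bu i hiL, bv i hiL, bu j hjL, bv j hjL]
  all_goals tauto

lemma union_sim (L : Nat) (uf : List Int × List Int × Int) (lab : List Int) (u v : Int)
    (hrel : SimRel L uf lab) (hu1 : -(L : Int) ≤ u) (hu2 : u < (L : Int))
    (hv1 : -(L : Int) ≤ v) (hv2 : v < (L : Int)) :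
    SimRel L (ufUnion uf u v).1 (bStep lab (u, v)) ∧
    (ufUnion uf u v).2
      = (if lab.getD (nIdx L u) 0 = lab.getD (nIdx L v) 0 then 0 else 1) ∧
    (ufUnion uf u v).1.2.2 = uf.2.2 - (ufUnion uf u v).2 := by
  obtain ⟨par, rank, nn⟩ := uf
  obtain ⟨hparL, hlabL, hgood, hinv, hcard⟩ := hrel
  simp only at hparL hlabL hgood hinv hcard
  have hL : 0 < L := by omega
  have huL : nIdx L u < L := nIdx_lt L u hu1 hu2 hL
  have hvL : nIdx L v < L := nIdx_lt L v hv1 hv2 hL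
  have hnIu : nIdx par.length u = nIdx L u := by rw [hparL]
  have hnIv : nIdx par.length v = nIdx L v := by rw [hparL]
  have huL' : nIdx L u < par.length := by rw [hparL]; exact huL
  obtain ⟨par1, hfind1, hgood1, hlen1, hpres1⟩ :=
    ufFind_spec_wrap (par.length + 1) par u hgood (by rw [hparL]; exact hu1)
      (by rw [hparL]; exact hu2)
      (by rw [hnIu]; have := distC_lt_length par hgood huL'; omega)
  rw [hnIu] at hfind1
  have hvL1 : nIdx L v < par1.length := by rw [hlen1, hparL]; exact hvL
  have hnIv1 : nIdx par1.length v = nIdx L v := by rw [hlen1, hparL]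
  obtain ⟨par2, hfind2, hgood2, hlen2, hpres2⟩ :=
    ufFind_spec_wrap (par1.length + 1) par1 v hgood1 (by rw [hlen1, hparL]; exact hv1)
      (by rw [hlen1, hparL]; exact hv2)
      (by rw [hnIv1]; have := distC_lt_length par1 hgood1 hvL1; omega)
  rw [hnIv1] at hfind2
  set r1 := rootC par (nIdx L u) with hr1def
  set r2 := rootC par1 (nIdx L v) with hr2def
  have hparL2 : par2.length = L := by rw [hlen2, hlen1, hparL]
  have hr2par : r2 = rootC par (nIdx L v) := by
    rw [hr2def, hpres1 (nIdx L v) (by rw [hparL]; exact hvL)]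
  have hr1lt : r1 < L := by rw [← hparL]; exact rootC_lt_length par hgood huL'
  have hr2lt : r2 < L := by
    have h := rootC_lt_length par1 hgood1 hvL1
    rw [hlen1, hparL] at h; exact h
  have hUU : ufUnion (par, rank, nn) u v =
      (if ((r1 : Nat) : Int) = ((r2 : Nat) : Int) then ((par2, rank, nn), 0)
       else if PySem.List.pyGetD rank ((r1 : Nat) : Int) 0 > PySem.List.pyGetD rank ((r2 : Nat) : Int) 0 then
         ((PySem.List.pySetD par2 ((r2 : Nat) : Int) ((r1 : Nat) : Int),
           PySem.List.pySetD rank ((r1 : Nat) : Int)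
             (PySem.List.pyGetD rank ((r1 : Nat) : Int) 0 + PySem.List.pyGetD rank ((r2 : Nat) : Int) 0),
           nn - 1), 1)
       else
         ((PySem.List.pySetD par2 ((r1 : Nat) : Int) ((r2 : Nat) : Int),
           PySem.List.pySetD rank ((r2 : Nat) : Int)
             (PySem.List.pyGetD rank ((r2 : Nat) : Int) 0 + PySem.List.pyGetD rank ((r1 : Nat) : Int) 0),
           nn - 1), 1)) := by
    simp only [ufUnion, hfind1, hfind2]
  have hpres12 : ∀ y, y < L → rootC par2 y = rootC par y := by
    intro y hy
    rw [hpres2 y (by rw [hlen1, hparL]; exact hy), hpres1 y (by rw [hparL]; exact hy)]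
  have hinv2 : ∀ i j, i < L → j < L →
      (rootC par2 i = rootC par2 j ↔ lab.getD i 0 = lab.getD j 0) := by
    intro i j hiL hjL
    rw [hpres12 i hiL, hpres12 j hjL]
    exact hinv i j hiL hjL
  have hru2 : rootC par2 (nIdx L u) = r1 := by rw [hpres12 (nIdx L u) huL]
  have hrv2 : rootC par2 (nIdx L v) = r2 := by rw [hpres12 (nIdx L v) hvL, hr2par]
  have habiff : r1 = r2 ↔ lab.getD (nIdx L u) 0 = lab.getD (nIdx L v) 0 := by
    rw [← hru2, ← hrv2]
    exact hinv2 (nIdx L u) (nIdx L v) huL hvL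
  have hbstep : bStep lab (u, v) =
      (if lab.getD (nIdx L u) 0 ≠ lab.getD (nIdx L v) 0 then
        lab.map (fun x => if x = lab.getD (nIdx L u) 0 then lab.getD (nIdx L v) 0 else x)
      else lab) := by
    simp only [bStep, pyGetD_wrap lab u 0 (by rw [hlabL]; exact hu1) (by rw [hlabL]; exact hu2),
      pyGetD_wrap lab v 0 (by rw [hlabL]; exact hv1) (by rw [hlabL]; exact hv2), hlabL]
  by_cases heq : lab.getD (nIdx L u) 0 = lab.getD (nIdx L v) 0
  · have hr12 : ((r1 : Nat) : Int) = ((r2 : Nat) : Int) := by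
      rw [Nat.cast_inj]; exact habiff.mpr heq
    rw [hUU, if_pos hr12, hbstep, if_neg (by simpa using heq)]
    refine ⟨⟨hparL2, hlabL, hgood2, hinv2, hcard⟩, by rw [if_pos heq], by ring⟩
  · have hr12 : ¬ ((r1 : Nat) : Int) = ((r2 : Nat) : Int) := by
      rw [Nat.cast_inj]; exact fun h => heq (habiff.mp h)
    have hr12' : r1 ≠ r2 := fun h => hr12 (by rw [h])
    have hbs : bStep lab (u, v) =
        lab.map (fun x => if x = lab.getD (nIdx L u) 0 then lab.getD (nIdx L v) 0 else x) := by
      rw [hbstep, if_pos heq]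
    have hroot1 : isRootP par2 r1 := by
      rw [← hru2]; exact rootC_isRoot par2 _ (hgood2 _ (by rw [hparL2]; exact huL)).2.2
    have hroot2 : isRootP par2 r2 := by
      rw [← hrv2]; exact rootC_isRoot par2 _ (hgood2 _ (by rw [hparL2]; exact hvL)).2.2
    have hcard' : (lab.map (fun x => if x = lab.getD (nIdx L u) 0 then lab.getD (nIdx L v) 0 else x)).toFinset.card + 1
        = lab.toFinset.card :=
      card_relabel lab (nIdx L u) (nIdx L v) (by rw [hlabL]; exact huL) (by rw [hlabL]; exact hvL) heq
    have hlabL' : (lab.map (fun x => if x = lab.getD (nIdx L u) 0 then lab.getD (nIdx L v) 0 else x)).length = L := by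
      rw [List.length_map]; exact hlabL
    by_cases hrank : PySem.List.pyGetD rank ((r1 : Nat) : Int) 0 > PySem.List.pyGetD rank ((r2 : Nat) : Int) 0
    · -- link r2 under r1
      have hset : PySem.List.pySetD par2 ((r2 : Nat) : Int) ((r1 : Nat) : Int)
          = par2.set r2 ((r1 : Nat) : Int) := by
        rw [PySem.List.pySetD_of_nonneg _ _ (by positivity), Int.toNat_natCast]
      obtain ⟨hgood3, hroot3⟩ := link par2 r2 r1 hgood2 (by rw [hparL2]; exact hr2lt)
        (by rw [hparL2]; exact hr1lt) hroot2 hroot1 (Ne.symm hr12')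
      rw [hUU, if_neg hr12, if_pos hrank, hbs, hset]
      refine ⟨⟨by simp [hparL2], hlabL', hgood3, ?_, ?_⟩, by rw [if_neg heq], by ring⟩
      · exact merged_inv L par2 _ lab (nIdx L u) (nIdx L v) hlabL hinv2 huL hvL r2 r1
          (Or.inr ⟨hrv2.symm, hru2.symm⟩)
          (fun y hy => hroot3 y (by rw [hparL2]; exact hy))
      · simp only [hcard]
        omega
    · have hset : PySem.List.pySetD par2 ((r1 : Nat) : Int) ((r2 : Nat) : Int)
          = par2.set r1 ((r2 : Nat) : Int) := by
        rw [PySem.List.pySetD_of_nonneg _ _ (by positivity), Int.toNat_natCast]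
      obtain ⟨hgood3, hroot3⟩ := link par2 r1 r2 hgood2 (by rw [hparL2]; exact hr1lt)
        (by rw [hparL2]; exact hr2lt) hroot1 hroot2 hr12'
      rw [hUU, if_neg hr12, if_neg hrank, hbs, hset]
      refine ⟨⟨by simp [hparL2], hlabL', hgood3, ?_, ?_⟩, by rw [if_neg heq], by ring⟩
      · exact merged_inv L par2 _ lab (nIdx L u) (nIdx L v) hlabL hinv2 huL hvL r1 r2
          (Or.inl ⟨hru2.symm, hrv2.symm⟩)
          (fun y hy => hroot3 y (by rw [hparL2]; exact hy))
      · simp only [hcard]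
        omega

lemma edgeOK_elim {n : Int} {e : List Int} (h : edgeOK n e = true) :
    ∃ t u v, e = [t, u, v] ∧ ((t = 1 ∨ t = 2 ∨ t = 3) →
      (-(n + 1) ≤ u ∧ u ≤ n ∧ -(n + 1) ≤ v ∧ v ≤ n)) := by
  rcases e with _ | ⟨t, _ | ⟨u, _ | ⟨v, _ | ⟨w, rest⟩⟩⟩⟩ <;> simp [edgeOK] at h
  refine ⟨t, u, v, rfl, fun ht => ?_⟩
  rcases h with h | h
  · rcases ht with rfl | rfl | rfl <;> simp_all
  · omega

lemma bor_self_eq (r : Int) (h : r = 0 ∨ r = 1) : PySem.Int.bor r r = r := by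
  rcases h with rfl | rfl <;> decide

lemma phase1_sim (n : Int) (hn : 0 ≤ n) :
    ∀ (edges : List (List Int)) (al : List Int × List Int × Int) (c : Int) (lab : List Int),
    (∀ e ∈ edges, edgeOK n e = true) → SimRel (n + 1).toNat al lab →
    ∃ al', phase1 edges (al, al, c) = (al', al', c + (al.2.2 - al'.2.2)) ∧
      SimRel (n + 1).toNat al' ((pairsOf 3 edges).foldl bStep lab) := by
  intro edges
  induction edges with
  | nil =>
    intro al c lab _ hrel
    exact ⟨al, by simp [phase1], hrel⟩
  | cons e rest ih =>
    intro al c lab hE hrel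
    obtain ⟨t, u, v, rfl, hb⟩ := edgeOK_elim (hE _ (List.mem_cons_self))
    have hE' : ∀ e ∈ rest, edgeOK n e = true := fun e he => hE e (List.mem_cons_of_mem _ he)
    by_cases ht : t = 3
    · subst ht
      obtain ⟨hu1, hu2, hv1, hv2⟩ := hb (by simp)
      have hL : ((n + 1).toNat : Int) = n + 1 := by omega
      obtain ⟨hrel1, hra, hnn⟩ := union_sim _ al lab u v hrel
        (by omega) (by omega) (by omega) (by omega)
      have hra01 : (ufUnion al u v).2 = 0 ∨ (ufUnion al u v).2 = 1 := by
        rw [hra]; split_ifs <;> simp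
      have hstep : phase1 ([3, u, v] :: rest) (al, al, c)
          = phase1 rest ((ufUnion al u v).1, (ufUnion al u v).1,
              c + PySem.Int.bor (ufUnion al u v).2 (ufUnion al u v).2) := rfl
      obtain ⟨al', heq, hrelF⟩ := ih ((ufUnion al u v).1) (c + (ufUnion al u v).2)
        (bStep lab (u, v)) hE' hrel1
      refine ⟨al', ?_, ?_⟩
      · rw [hstep, bor_self_eq _ hra01, heq]
        have h3 : c + (ufUnion al u v).2 + ((ufUnion al u v).1.2.2 - al'.2.2)
            = c + (al.2.2 - al'.2.2) := by
          rw [hnn]; ring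
        rw [h3]
      · have hp : pairsOf 3 ([3, u, v] :: rest) = (u, v) :: pairsOf 3 rest := by
          simp [pairsOf]
        rw [hp, List.foldl_cons]
        exact hrelF
    · have hstep : phase1 ([t, u, v] :: rest) (al, al, c) = phase1 rest (al, al, c) := by
        show phase1 rest (if t = 3 then _ else (al, al, c)) = _
        rw [if_neg ht]
      have hp : pairsOf 3 ([t, u, v] :: rest) = pairsOf 3 rest := by
        simp [pairsOf, ht]
      rw [hstep, hp]
      exact ih al c lab hE' hrel

lemma phase2_sim (n : Int) (hn : 0 ≤ n) :
    ∀ (edges : List (List Int)) (al bo : List Int × List Int × Int) (c : Int)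
      (labA labB : List Int),
    (∀ e ∈ edges, edgeOK n e = true) →
    SimRel (n + 1).toNat al labA → SimRel (n + 1).toNat bo labB →
    ∃ al' bo', phase2 edges (al, bo, c)
        = (al', bo', c + (al.2.2 - al'.2.2) + (bo.2.2 - bo'.2.2)) ∧
      SimRel (n + 1).toNat al' ((pairsOf 1 edges).foldl bStep labA) ∧
      SimRel (n + 1).toNat bo' ((pairsOf 2 edges).foldl bStep labB) := by
  intro edges
  induction edges with
  | nil =>
    intro al bo c labA labB _ hrelA hrelB
    exact ⟨al, bo, by simp [phase2], hrelA, hrelB⟩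
  | cons e rest ih =>
    intro al bo c labA labB hE hrelA hrelB
    obtain ⟨t, u, v, rfl, hb⟩ := edgeOK_elim (hE _ (List.mem_cons_self))
    have hE' : ∀ e ∈ rest, edgeOK n e = true := fun e he => hE e (List.mem_cons_of_mem _ he)
    have hL : ((n + 1).toNat : Int) = n + 1 := by omega
    by_cases ht1 : t = 1
    · subst ht1
      obtain ⟨hu1, hu2, hv1, hv2⟩ := hb (by simp)
      obtain ⟨hrel1, hra, hnn⟩ := union_sim _ al labA u v hrelA
        (by omega) (by omega) (by omega) (by omega)
      have hstep : phase2 ([1, u, v] :: rest) (al, bo, c)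
          = phase2 rest ((ufUnion al u v).1, bo, c + (ufUnion al u v).2) := rfl
      obtain ⟨al', bo', heq, hrelA', hrelB'⟩ := ih ((ufUnion al u v).1) bo
        (c + (ufUnion al u v).2) (bStep labA (u, v)) labB hE' hrel1 hrelB
      refine ⟨al', bo', ?_, ?_, hrelB'⟩
      · rw [hstep, heq]
        have h3 : c + (ufUnion al u v).2 + ((ufUnion al u v).1.2.2 - al'.2.2) + (bo.2.2 - bo'.2.2)
            = c + (al.2.2 - al'.2.2) + (bo.2.2 - bo'.2.2) := by
          rw [hnn]; ring
        rw [h3]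
      · have hp : pairsOf 1 ([1, u, v] :: rest) = (u, v) :: pairsOf 1 rest := by
          simp [pairsOf]
        rw [hp, List.foldl_cons]
        exact hrelA'
    · by_cases ht2 : t = 2
      · subst ht2
        obtain ⟨hu1, hu2, hv1, hv2⟩ := hb (by simp)
        obtain ⟨hrel1, hra, hnn⟩ := union_sim _ bo labB u v hrelB
          (by omega) (by omega) (by omega) (by omega)
        have hstep : phase2 ([2, u, v] :: rest) (al, bo, c)
            = phase2 rest (al, (ufUnion bo u v).1, c + (ufUnion bo u v).2) := rfl
        obtain ⟨al', bo', heq, hrelA', hrelB'⟩ := ih al ((ufUnion bo u v).1)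
          (c + (ufUnion bo u v).2) labA (bStep labB (u, v)) hE' hrelA hrel1
        refine ⟨al', bo', ?_, ?_, ?_⟩
        · rw [hstep, heq]
          have h3 : c + (ufUnion bo u v).2 + (al.2.2 - al'.2.2) + ((ufUnion bo u v).1.2.2 - bo'.2.2)
              = c + (al.2.2 - al'.2.2) + (bo.2.2 - bo'.2.2) := by
            rw [hnn]; ring
          rw [h3]
        · have hp : pairsOf 1 ([2, u, v] :: rest) = pairsOf 1 rest := by simp [pairsOf]
          rw [hp]; exact hrelA'
        · have hp : pairsOf 2 ([2, u, v] :: rest) = (u, v) :: pairsOf 2 rest := by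
            simp [pairsOf]
          rw [hp, List.foldl_cons]; exact hrelB'
      · have hstep : phase2 ([t, u, v] :: rest) (al, bo, c) = phase2 rest (al, bo, c) := by
          show phase2 rest (if t = 1 then _ else if t = 2 then _ else (al, bo, c)) = _
          rw [if_neg ht1, if_neg ht2]
        have hp1 : pairsOf 1 ([t, u, v] :: rest) = pairsOf 1 rest := by simp [pairsOf, ht1]
        have hp2 : pairsOf 2 ([t, u, v] :: rest) = pairsOf 2 rest := by simp [pairsOf, ht2]
        rw [hstep, hp1, hp2]
        exact ih al bo c labA labB hE' hrelA hrelB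

lemma pyRange_id (n : Int) :
    PySem.List.pyRange 0 (n + 1) 1 = (List.range (n + 1).toNat).map Nat.cast := by
  rw [PySem.List.pyRange_one]
  simp

lemma simrel_init (n : Int) (hn : 0 ≤ n) :
    SimRel (n + 1).toNat (ufInit n) (PySem.List.pyRange 0 (n + 1) 1) := by
  have hr := pyRange_id n
  have hlen : (PySem.List.pyRange 0 (n + 1) 1).length = (n + 1).toNat := by
    rw [hr]; simp
  have hget : ∀ i, i < (n + 1).toNat →
      (PySem.List.pyRange 0 (n + 1) 1).getD i 0 = ((i : Nat) : Int) := by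
    intro i hi
    rw [hr, List.getD_eq_getElem _ _ (by simpa using hi)]
    simp
  have hstep : ∀ i, i < (n + 1).toNat → stepP (PySem.List.pyRange 0 (n + 1) 1) i = i := by
    intro i hi
    rw [stepP, hget i hi, Int.toNat_natCast]
  have hgood : GoodP (PySem.List.pyRange 0 (n + 1) 1) := by
    intro i hi
    rw [hlen] at hi
    refine ⟨by rw [hget i hi]; positivity, by rw [hlen, hstep i hi]; exact hi, ⟨0, hstep i hi⟩⟩
  have hroot : ∀ i, i < (n + 1).toNat → rootC (PySem.List.pyRange 0 (n + 1) 1) i = i := by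
    intro i hi
    exact rootC_of_isRoot _ (hstep i hi)
  refine ⟨by simp [ufInit, hlen], by exact hlen, by exact hgood, ?_, ?_⟩
  · intro i j hiL hjL
    show rootC (PySem.List.pyRange 0 (n + 1) 1) i = rootC (PySem.List.pyRange 0 (n + 1) 1) j ↔ _
    rw [hroot i hiL, hroot j hjL, hget i hiL, hget j hjL]
    exact ⟨fun h => by rw [h], fun h => by exact_mod_cast h⟩
  · show n = _
    have hnd : ((List.range (n + 1).toNat).map (Nat.cast : Nat → Int)).Nodup :=
      List.nodup_range.map Nat.cast_injective
    rw [hr, List.toFinset_card_of_nodup hnd]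
    simp
    omega

lemma set_ofList_len (l : List Int) : (PySem.Set.ofList l).length = l.toFinset.card := by
  rw [← List.toFinset_card_of_nodup (PySem.Set.nodup_ofList l)]
  congr 1
  apply Finset.ext
  intro z
  simp [List.mem_toFinset, PySem.Set.mem_ofList]

-- skipped rows: with n < 0, Pre_ admits only rows whose type is not 1, 2 or 3
lemma phase1_skip (n : Int) (hn : n < 0) :
    ∀ (edges : List (List Int)) (st : (List Int × List Int × Int) × (List Int × List Int × Int) × Int),
    (∀ e ∈ edges, edgeOK n e = true) → phase1 edges st = st := by
  intro edges
  induction edges with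
  | nil => intro st _; rfl
  | cons e rest ih =>
    intro st hE
    obtain ⟨t, u, v, rfl, hb⟩ := edgeOK_elim (hE _ (List.mem_cons_self))
    have ht : ¬ t = 3 := fun h => by have := hb (Or.inr (Or.inr h)); omega
    have hstep : phase1 ([t, u, v] :: rest) st = phase1 rest st := by
      obtain ⟨al, bo, c⟩ := st
      show phase1 rest (if t = 3 then _ else (al, bo, c)) = _
      rw [if_neg ht]
    rw [hstep]
    exact ih st (fun e he => hE e (List.mem_cons_of_mem _ he))

lemma phase2_skip (n : Int) (hn : n < 0) :
    ∀ (edges : List (List Int)) (st : (List Int × List Int × Int) × (List Int × List Int × Int) × Int),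
    (∀ e ∈ edges, edgeOK n e = true) → phase2 edges st = st := by
  intro edges
  induction edges with
  | nil => intro st _; rfl
  | cons e rest ih =>
    intro st hE
    obtain ⟨t, u, v, rfl, hb⟩ := edgeOK_elim (hE _ (List.mem_cons_self))
    have ht1 : ¬ t = 1 := fun h => by have := hb (Or.inl h); omega
    have ht2 : ¬ t = 2 := fun h => by have := hb (Or.inr (Or.inl h)); omega
    have hstep : phase2 ([t, u, v] :: rest) st = phase2 rest st := by
      obtain ⟨al, bo, c⟩ := st
      show phase2 rest (if t = 1 then _ else if t = 2 then _ else (al, bo, c)) = _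
      rw [if_neg ht1, if_neg ht2]
    rw [hstep]
    exact ih st (fun e he => hE e (List.mem_cons_of_mem _ he))

lemma pairsOf_skip (n t0 : Int) (hn : n < 0) (ht0 : t0 = 1 ∨ t0 = 2 ∨ t0 = 3) :
    ∀ (edges : List (List Int)), (∀ e ∈ edges, edgeOK n e = true) → pairsOf t0 edges = [] := by
  intro edges
  induction edges with
  | nil => intro _; rfl
  | cons e rest ih =>
    intro hE
    obtain ⟨t, u, v, rfl, hb⟩ := edgeOK_elim (hE _ (List.mem_cons_self))
    have ht : ¬ t = t0 := by
      rcases ht0 with rfl | rfl | rfl <;>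
        exact fun h => by have := hb (by tauto); omega
    have : pairsOf t0 ([t, u, v] :: rest) = pairsOf t0 rest := by simp [pairsOf, ht]
    rw [this]
    exact ih (fun e he => hE e (List.mem_cons_of_mem _ he))

-- ===== VERDICT (by name: the statement is the Claim_ definition above) =====
theorem maxNumEdgesToRemove_spec : Claim_equal_maxNumEdgesToRemove := by
  intro n edges _ hpre
  unfold Spec_maxNumEdgesToRemove
  have hE : ∀ e ∈ edges, edgeOK n e = true := by
    intro e he
    exact List.all_eq_true.mp hpre e he
  by_cases hn : 0 ≤ n
  · -- main case
    obtain ⟨al1, heq1, hrel1⟩ :=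
      phase1_sim n hn edges (ufInit n) 0 (PySem.List.pyRange 0 (n + 1) 1) hE (simrel_init n hn)
    obtain ⟨al2, bo2, heq2, hrelA, hrelB⟩ :=
      phase2_sim n hn edges al1 al1 (0 + ((ufInit n).2.2 - al1.2.2))
        ((pairsOf 3 edges).foldl bStep (PySem.List.pyRange 0 (n + 1) 1))
        ((pairsOf 3 edges).foldl bStep (PySem.List.pyRange 0 (n + 1) 1)) hE hrel1 hrel1
    have hc3 : bComponents n (pairsOf 3 edges) = al1.2.2 + 1 := by
      rw [bComponents]
      show ((PySem.Set.ofList ((pairsOf 3 edges).foldl bStep (PySem.List.pyRange 0 (n + 1) 1))).length : Int) = _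
      rw [set_ofList_len, hrel1.2.2.2.2]
      ring
    have hca : bComponents n (pairsOf 3 edges ++ pairsOf 1 edges) = al2.2.2 + 1 := by
      rw [bComponents]
      show ((PySem.Set.ofList ((pairsOf 3 edges ++ pairsOf 1 edges).foldl bStep (PySem.List.pyRange 0 (n + 1) 1))).length : Int) = _
      rw [List.foldl_append, set_ofList_len, hrelA.2.2.2.2]
      ring
    have hcb : bComponents n (pairsOf 3 edges ++ pairsOf 2 edges) = bo2.2.2 + 1 := by
      rw [bComponents]
      show ((PySem.Set.ofList ((pairsOf 3 edges ++ pairsOf 2 edges).foldl bStep (PySem.List.pyRange 0 (n + 1) 1))).length : Int) = _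
      rw [List.foldl_append, set_ofList_len, hrelB.2.2.2.2]
      ring
    show maxNumEdgesToRemove n edges = _
    rw [maxNumEdgesToRemove, maxNumEdgesToRemove_alt]
    simp only [heq1, heq2, hc3, hca, hcb]
    have hinitn : (ufInit n).2.2 = n := rfl
    rw [hinitn]
    by_cases hcond : bo2.2.2 = 1 ∧ al2.2.2 = 1
    · rw [if_pos hcond, if_pos (by constructor <;> omega)]
      ring
    · rw [if_neg hcond, if_neg (fun h => hcond (by omega))]
  · -- n < 0: every admitted row has a type other than 1, 2, 3, so nothing is ever unioned
    have hn' : n < 0 := by omega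
    have hA : maxNumEdgesToRemove n edges = -1 := by
      rw [maxNumEdgesToRemove, phase1_skip n hn' edges _ hE, phase2_skip n hn' edges _ hE]
      show (if n = 1 ∧ n = 1 then _ else (-1 : Int)) = -1
      rw [if_neg (by omega)]
    have hlab0 : PySem.List.pyRange 0 (n + 1) 1 = [] := by
      apply List.eq_nil_of_length_eq_zero
      rw [PySem.List.length_pyRange_one]
      omega
    have hcomp : bComponents n ([] : List (Int × Int)) = 0 := by
      rw [bComponents]
      show ((PySem.Set.ofList (([] : List (Int × Int)).foldl bStep (PySem.List.pyRange 0 (n + 1) 1))).length : Int) = 0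
      rw [hlab0]
      rfl
    have hB : maxNumEdgesToRemove_alt n edges = -1 := by
      rw [maxNumEdgesToRemove_alt,
        pairsOf_skip n 3 hn' (by tauto) edges hE,
        pairsOf_skip n 1 hn' (by tauto) edges hE,
        pairsOf_skip n 2 hn' (by tauto) edges hE]
      show (if bComponents n [] = 2 ∧ bComponents n ([] ++ []) = 2 then _ else (-1 : Int)) = -1
      rw [if_neg (by rw [hcomp]; simp)]
    rw [hA, hB]
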